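-- pv_equiv track=rewrite | github.com/swylab/programmers_study | 프로그래머스/0/181943. 문자열 겹쳐쓰기/문자열 겹쳐쓰기.py | solution
-- ===== SOURCE A (Python) =====
-- def solution(m, o, s):
--     answer=[]
--     for i in range(len(m)):
--         if i < s:
--             answer.append(m[i])
--         elif i >= s + len(o):
--             answer.append(m[i])
--         else:
--             answer.append(o[i-s])
--     a = "".join(answer)
--     return a
-- ===== SOURCE B (Python) =====
-- def solution(m, o, s):
--     # Copy the base string, then overwrite only the in-bounds overlay positions.
--     answer = list(m)
--     for i in range(len(o)):
--         if 0 <= s + i < len(m):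
--             answer[s + i] = o[i]
--     return "".join(answer)
-- ===== Notes on version B (the rewrite author's own statement) =====
-- stated objective: simpler
-- what changed: B copies m into a mutable list and iterates over the overlay o, overwriting in-bounds positions, instead of scanning every index of m with a three-way branch.
import Mathlib
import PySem

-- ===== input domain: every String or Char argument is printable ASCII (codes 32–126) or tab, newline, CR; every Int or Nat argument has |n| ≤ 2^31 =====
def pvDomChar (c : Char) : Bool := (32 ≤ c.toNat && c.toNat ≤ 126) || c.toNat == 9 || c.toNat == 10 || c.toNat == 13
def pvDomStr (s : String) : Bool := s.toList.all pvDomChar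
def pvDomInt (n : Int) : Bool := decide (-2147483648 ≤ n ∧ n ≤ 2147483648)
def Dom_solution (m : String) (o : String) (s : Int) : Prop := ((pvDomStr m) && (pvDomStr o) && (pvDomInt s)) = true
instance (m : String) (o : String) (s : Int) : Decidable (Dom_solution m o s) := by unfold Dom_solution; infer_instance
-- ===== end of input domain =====

-- B copies m into a mutable list and overwrites in-bounds overlay positions while iterating over o,
-- instead of scanning every index of m with a three-way branch (objective: simpler).


-- ===== PORT A =====
-- for i in range(len(m)): append m[i] / m[i] / o[i-s] (branch on i < s, i >= s+len(o)); join.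
-- m[i] and o[i-s] are always in range on these branches, so pyGetD with a dummy default is exact.
def solution (m : String) (o : String) (s : Int) : String :=
  String.mk ((PySem.List.pyRange 0 (m.toList.length : Int) 1).foldl (fun acc i =>
    if i < s then acc ++ [PySem.List.pyGetD m.toList i ' ']
    else if i ≥ s + (o.toList.length : Int) then acc ++ [PySem.List.pyGetD m.toList i ' ']
    else acc ++ [PySem.List.pyGetD o.toList (i - s) ' ']) [])

-- ===== PORT B =====
-- answer = list(m); for i in range(len(o)): if 0 <= s+i < len(m): answer[s+i] = o[i]; join.
def solution_alt (m : String) (o : String) (s : Int) : String :=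
  String.mk ((PySem.List.pyRange 0 (o.toList.length : Int) 1).foldl (fun acc i =>
    if 0 ≤ s + i ∧ s + i < (m.toList.length : Int) then
      PySem.List.pySetD acc (s + i) (PySem.List.pyGetD o.toList i ' ')
    else acc) m.toList)

-- ===== PRECONDITION & SPEC =====
def Spec_solution (m : String) (o : String) (s : Int) (out : String) : Prop := out = solution_alt m o s
instance (m : String) (o : String) (s : Int) (out : String) : Decidable (Spec_solution m o s out) := by unfold Spec_solution; infer_instance

-- ===== CLAIM (what is proved, stated in full; the proofs are below) =====
def Claim_equal_solution : Prop := ∀ (m : String) (o : String) (s : Int), Dom_solution m o s → Spec_solution m o s (solution m o s)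

-- ===== LEMMAS AND PROOFS =====

-- B's loop invariant: after processing range(0, t), position j holds o[j-s] iff s ≤ j < s+t, else m[j].
theorem b_inv (ol ml : List Char) (s : Int) (t : Nat) (ht : t ≤ ol.length) :
    ((PySem.List.pyRange 0 (t : Int) 1).foldl (fun acc i =>
      if 0 ≤ s + i ∧ s + i < (ml.length : Int) then
        PySem.List.pySetD acc (s + i) (PySem.List.pyGetD ol i ' ')
      else acc) ml).length = ml.length ∧
    ∀ j : Nat, j < ml.length →
      ((PySem.List.pyRange 0 (t : Int) 1).foldl (fun acc i =>
        if 0 ≤ s + i ∧ s + i < (ml.length : Int) then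
          PySem.List.pySetD acc (s + i) (PySem.List.pyGetD ol i ' ')
        else acc) ml).getD j ' ' =
      if s ≤ (j : Int) ∧ (j : Int) < s + t then ol.getD ((j : Int) - s).toNat ' '
      else ml.getD j ' ' := by
  induction t with
  | zero =>
    simp [PySem.List.pyRange_one_eq_nil]
  | succ t ih =>
    have ht' : t ≤ ol.length := by omega
    obtain ⟨ihlen, ihget⟩ := ih ht'
    have hsplit : PySem.List.pyRange 0 ((t + 1 : Nat) : Int) 1
        = PySem.List.pyRange 0 (t : Int) 1 ++ [(t : Int)] := by
      push_cast
      exact PySem.List.pyRange_one_succ_right (by positivity)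
    rw [hsplit, List.foldl_append]
    simp only [List.foldl_cons, List.foldl_nil]
    set R := (PySem.List.pyRange 0 (t : Int) 1).foldl (fun acc i =>
      if 0 ≤ s + i ∧ s + i < (ml.length : Int) then
        PySem.List.pySetD acc (s + i) (PySem.List.pyGetD ol i ' ')
      else acc) ml with hR
    by_cases hg : 0 ≤ s + (t : Int) ∧ s + (t : Int) < (ml.length : Int)
    · rw [if_pos hg]
      rw [PySem.List.pySetD_of_nonneg _ _ hg.1]
      constructor
      · simp [ihlen]
      · intro j hj
        rw [List.getD_eq_getElem?_getD, List.getElem?_set]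
        by_cases hjeq : (s + (t : Int)).toNat = j
        · have hjs : (j : Int) = s + t := by omega
          rw [if_pos hjeq, if_pos (show (s + (t : Int)).toNat < R.length by omega)]
          simp only [Option.getD_some]
          rw [if_pos (show s ≤ (j : Int) ∧ (j : Int) < s + ((t + 1 : Nat) : Int) by
            constructor <;> omega)]
          have htn : ((j : Int) - s).toNat = t := by omega
          rw [htn]
          rw [PySem.List.pyGetD_eq_getElem _ ' ' (by positivity) (by exact_mod_cast ht)]
          simp [List.getD_eq_getElem?_getD, List.getElem?_eq_getElem (show t < ol.length by omega)]
        · rw [if_neg hjeq, ← List.getD_eq_getElem?_getD, ihget j hj]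
          have hne : ¬((j : Int) = s + t) := by omega
          by_cases hc : s ≤ (j : Int) ∧ (j : Int) < s + t
          · rw [if_pos hc, if_pos ⟨hc.1, by omega⟩]
          · rw [if_neg hc, if_neg (by omega)]
    · rw [if_neg hg]
      refine ⟨ihlen, fun j hj => ?_⟩
      rw [ihget j hj]
      by_cases hc : s ≤ (j : Int) ∧ (j : Int) < s + t
      · rw [if_pos hc, if_pos ⟨hc.1, by omega⟩]
      · rw [if_neg hc, if_neg (by omega)]

-- A's loop appends one character per index: it is a map over the range.
theorem a_map (ml ol : List Char) (s : Int) :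
    (PySem.List.pyRange 0 (ml.length : Int) 1).foldl (fun acc i =>
      if i < s then acc ++ [PySem.List.pyGetD ml i ' ']
      else if i ≥ s + (ol.length : Int) then acc ++ [PySem.List.pyGetD ml i ' ']
      else acc ++ [PySem.List.pyGetD ol (i - s) ' ']) []
    = (PySem.List.pyRange 0 (ml.length : Int) 1).map (fun i =>
        if i < s then PySem.List.pyGetD ml i ' '
        else if i ≥ s + (ol.length : Int) then PySem.List.pyGetD ml i ' '
        else PySem.List.pyGetD ol (i - s) ' ') := by
  have h := PySem.List.foldl_append_singleton_eq_map
    (l := PySem.List.pyRange 0 (ml.length : Int) 1) (acc := ([] : List Char))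
    (f := fun i =>
        if i < s then PySem.List.pyGetD ml i ' '
        else if i ≥ s + (ol.length : Int) then PySem.List.pyGetD ml i ' '
        else PySem.List.pyGetD ol (i - s) ' ')
  have hfun : (fun (acc : List Char) (i : Int) =>
      if i < s then acc ++ [PySem.List.pyGetD ml i ' ']
      else if i ≥ s + (ol.length : Int) then acc ++ [PySem.List.pyGetD ml i ' ']
      else acc ++ [PySem.List.pyGetD ol (i - s) ' '])
      = (fun (acc : List Char) (i : Int) => acc ++
        [if i < s then PySem.List.pyGetD ml i ' '
         else if i ≥ s + (ol.length : Int) then PySem.List.pyGetD ml i ' '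
         else PySem.List.pyGetD ol (i - s) ' ']) := by
    funext acc i
    by_cases h1 : i < s
    · simp [h1]
    · by_cases h2 : i ≥ s + (ol.length : Int) <;> simp [h1, h2]
  rw [hfun, h, List.nil_append]

-- ===== VERDICT (by name: the statement is the Claim_ definition above) =====
theorem solution_spec : Claim_equal_solution := by
  intro m o s _
  show solution m o s = solution_alt m o s
  unfold solution solution_alt
  set ml := m.toList
  set ol := o.toList
  obtain ⟨hlen, hget⟩ := b_inv ol ml s ol.length le_rfl
  rw [a_map]
  congr 1
  apply List.ext_getElem
  · simpa [PySem.List.length_pyRange_one] using hlen.symm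
  · intro j hj1 hj2
    have hjm : j < ml.length := by
      simpa [PySem.List.length_pyRange_one] using hj1
    have hB := hget j hjm
    rw [List.getD_eq_getElem _ ' ' hj2] at hB
    rw [List.getElem_map, PySem.List.getElem_pyRange_one, zero_add, hB]
    by_cases h1 : (j : Int) < s
    · rw [if_pos h1, if_neg (by omega)]
      rw [PySem.List.pyGetD_eq_getElem _ ' ' (by positivity) (by exact_mod_cast hjm)]
      simp [hjm]
    · by_cases h2 : (j : Int) ≥ s + (ol.length : Int)
      · rw [if_neg h1, if_pos h2, if_neg (by omega)]
        rw [PySem.List.pyGetD_eq_getElem _ ' ' (by positivity) (by exact_mod_cast hjm)]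
        simp [hjm]
      · rw [if_neg h1, if_neg h2, if_pos (by omega)]
        have hr1 : (0 : Int) ≤ (j : Int) - s := by omega
        have hr2 : (j : Int) - s < (ol.length : Int) := by omega
        rw [PySem.List.pyGetD_eq_getElem _ ' ' hr1 hr2]
        have : ((j : Int) - s).toNat < ol.length := by omega
        simp [this]
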